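-- pv_equiv track=rewrite | github.com/lebahoang/cp | hrk/week36/5.py | getReduceRangeVertically
-- ===== SOURCE A (Python) =====
-- def getReduceRangeVertically(arr, k, i, j):
-- 	stop = min(i+k, len(arr)-1)
--
-- 	minV = None
-- 	b = -1
-- 	c = 0
-- 	for m in range(i, stop+1):
-- 		c += arr[m][j]
-- 		if minV == None or minV > c:
-- 			minV = c
-- 			b = m
--
-- 	return (j, i, b)
-- ===== SOURCE B (Python) =====
-- def getReduceRangeVertically(arr, k, i, j):
--     stop = min(i + k, len(arr) - 1)
--     sums = []
--     c = 0
--     for m in range(i, stop + 1):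
--         c += arr[m][j]
--         sums.append(c)
--     if not sums:
--         return (j, i, -1)
--     best = min(sums)
--     return (j, i, i + sums.index(best))
-- ===== Notes on version B (the rewrite author's own statement) =====
-- stated objective: alternative
-- what changed: B materializes the column prefix-sum list in a first pass and then computes the answer row with min and first-index lookup, instead of A's single streaming pass that tracks the running minimum and its row inline.
import Mathlib
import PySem

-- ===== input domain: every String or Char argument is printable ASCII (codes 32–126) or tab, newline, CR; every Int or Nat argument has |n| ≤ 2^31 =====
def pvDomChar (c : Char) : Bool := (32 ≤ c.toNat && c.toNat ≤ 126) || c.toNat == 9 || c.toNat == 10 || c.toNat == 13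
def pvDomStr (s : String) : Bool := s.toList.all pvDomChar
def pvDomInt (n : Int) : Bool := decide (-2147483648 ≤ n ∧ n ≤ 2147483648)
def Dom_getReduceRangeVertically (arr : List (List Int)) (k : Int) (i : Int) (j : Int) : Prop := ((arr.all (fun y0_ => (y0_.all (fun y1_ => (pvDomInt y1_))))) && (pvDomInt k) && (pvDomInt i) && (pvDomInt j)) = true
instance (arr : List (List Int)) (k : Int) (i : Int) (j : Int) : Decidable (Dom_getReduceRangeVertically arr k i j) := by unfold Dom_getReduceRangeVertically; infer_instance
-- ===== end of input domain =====

-- B builds the column prefix-sum list in a first pass and answers with min + first index,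
-- instead of A's single streaming pass tracking the running minimum and its row inline (alternative decomposition, same cost).

-- ===== PORT A =====
-- arr[m][j] (Python negative-index semantics); total via a default, exact inside Pre_ where both accesses are in range
def pvCell (arr : List (List Int)) (j m : Int) : Int :=
  PySem.List.pyGetD (PySem.List.pyGetD arr m []) j 0

def getReduceRangeVertically (arr : List (List Int)) (k : Int) (i : Int) (j : Int) : Int × Int × Int :=
  let stop := min (i + k) ((arr.length : Int) - 1)
  let st := (PySem.List.pyRange i (stop + 1) 1).foldl
    (fun (st : Option Int × Int × Int) m =>
      let c := st.2.2 + pvCell arr j m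
      match st.1 with
      | none => (some c, m, c)
      | some v => if v > c then (some c, m, c) else (some v, st.2.1, c))
    (none, -1, 0)
  (j, i, st.2.1)

-- ===== PORT B =====
def getReduceRangeVertically_alt (arr : List (List Int)) (k : Int) (i : Int) (j : Int) : Int × Int × Int :=
  let stop := min (i + k) ((arr.length : Int) - 1)
  let p := (PySem.List.pyRange i (stop + 1) 1).foldl
    (fun (p : Int × List Int) m =>
      let c := p.1 + pvCell arr j m
      (c, p.2 ++ [c]))
    (0, [])
  let sums := p.2
  if sums = [] then (j, i, -1)
  else
    let best := (PySem.List.min? sums (fun y => y)).getD 0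
    (j, i, i + (((PySem.List.index? sums best).getD 0 : Nat) : Int))

-- ===== PRECONDITION & SPEC =====
-- Pre_: exactly the inputs where every access arr[m][j] of the loop is in range (Python sense); elsewhere A raises IndexError.
def Pre_getReduceRangeVertically (arr : List (List Int)) (k : Int) (i : Int) (j : Int) : Prop :=
  ∀ m ∈ PySem.List.pyRange i (min (i + k) ((arr.length : Int) - 1) + 1) 1,
    PySem.Raise.InRange arr.length m ∧ PySem.Raise.InRange (PySem.List.pyGetD arr m []).length j
instance (arr : List (List Int)) (k : Int) (i : Int) (j : Int) : Decidable (Pre_getReduceRangeVertically arr k i j) := by unfold Pre_getReduceRangeVertically; infer_instance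
def pvWitness_getReduceRangeVertically : List (List Int) × Int × Int × Int := ([[1, 2], [3]], 1, 0, 0)

def Spec_getReduceRangeVertically (arr : List (List Int)) (k : Int) (i : Int) (j : Int) (out : Int × Int × Int) : Prop := out = getReduceRangeVertically_alt arr k i j
instance (arr : List (List Int)) (k : Int) (i : Int) (j : Int) (out : Int × Int × Int) : Decidable (Spec_getReduceRangeVertically arr k i j out) := by unfold Spec_getReduceRangeVertically; infer_instance

-- ===== CLAIM (what is proved, stated in full; the proofs are below) =====
def Claim_equal_getReduceRangeVertically : Prop := ∀ (arr : List (List Int)) (k : Int) (i : Int) (j : Int), Dom_getReduceRangeVertically arr k i j → Pre_getReduceRangeVertically arr k i j → Spec_getReduceRangeVertically arr k i j (getReduceRangeVertically arr k i j)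

-- ===== LEMMAS AND PROOFS =====

-- prefix sums of the column values along a row list, starting from accumulator c
def pvAccum (arr : List (List Int)) (j : Int) (c : Int) : List Int → List Int
  | [] => []
  | m :: l => (c + pvCell arr j m) :: pvAccum arr j (c + pvCell arr j m) l

-- A's loop after the first row, as a scan over the remaining rows
def pvScan (arr : List (List Int)) (j : Int) (v b c : Int) : List Int → Int × Int
  | [] => (v, b)
  | m :: l =>
    if v > c + pvCell arr j m then pvScan arr j (c + pvCell arr j m) m (c + pvCell arr j m) l
    else pvScan arr j v b (c + pvCell arr j m) l

-- first-argmin scan over a sums list; r = absolute row of the next element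
def pvAm (v b : Int) : List Int → Int → Int × Int
  | [], _ => (v, b)
  | x :: t, r => if v > x then pvAm x r t (r + 1) else pvAm v b t (r + 1)

lemma pvFoldB (arr : List (List Int)) (j : Int) :
    ∀ (l : List Int) (c : Int) (s : List Int),
      l.foldl (fun (p : Int × List Int) m =>
          let c := p.1 + pvCell arr j m
          (c, p.2 ++ [c])) (c, s)
      = (c + (l.map (pvCell arr j)).sum, s ++ pvAccum arr j c l) := by
  intro l
  induction l with
  | nil => simp [pvAccum]
  | cons m l ih =>
    intro c s
    simp only [List.foldl_cons, List.map_cons, List.sum_cons, pvAccum, ih, Prod.mk.injEq]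
    exact ⟨by ring, by simp⟩

lemma pvFoldA (arr : List (List Int)) (j : Int) :
    ∀ (l : List Int) (v b c : Int),
      l.foldl (fun (st : Option Int × Int × Int) m =>
          match st.1 with
          | none => (some (st.2.2 + pvCell arr j m), m, st.2.2 + pvCell arr j m)
          | some v => if v > st.2.2 + pvCell arr j m
              then (some (st.2.2 + pvCell arr j m), m, st.2.2 + pvCell arr j m)
              else (some v, st.2.1, st.2.2 + pvCell arr j m))
        (some v, b, c)
      = (some (pvScan arr j v b c l).1, (pvScan arr j v b c l).2, c + (l.map (pvCell arr j)).sum) := by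
  intro l
  induction l with
  | nil => simp [pvScan]
  | cons m l ih =>
    intro v b c
    simp only [List.foldl_cons, List.map_cons, List.sum_cons, pvScan]
    by_cases h : v > c + pvCell arr j m
    · simp only [if_pos h, ih, Prod.mk.injEq]
      exact ⟨trivial, trivial, by ring⟩
    · simp only [if_neg h, ih, Prod.mk.injEq]
      exact ⟨trivial, trivial, by ring⟩

lemma pvRangeNorm (a b : Int) :
    PySem.List.pyRange a b 1 = PySem.List.pyRange a (a + ((b - a).toNat : Int)) 1 := by
  rw [PySem.List.pyRange_one, PySem.List.pyRange_one]
  congr 2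
  omega

lemma pvScan_pyRange (arr : List (List Int)) (j : Int) :
    ∀ (n : Nat) (r v b c : Int),
      pvScan arr j v b c (PySem.List.pyRange r (r + (n : Int)) 1)
      = pvAm v b (pvAccum arr j c (PySem.List.pyRange r (r + (n : Int)) 1)) r := by
  intro n
  induction n with
  | zero => simp [PySem.List.pyRange_one_eq_nil, pvScan, pvAccum, pvAm]
  | succ n ih =>
    intro r v b c
    have hcons : PySem.List.pyRange r (r + ((n + 1 : Nat) : Int)) 1
        = r :: PySem.List.pyRange (r + 1) (r + ((n + 1 : Nat) : Int)) 1 :=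
      PySem.List.pyRange_one_cons (by push_cast; omega)
    have harg : r + ((n + 1 : Nat) : Int) = (r + 1) + ((n : Nat) : Int) := by push_cast; ring
    rw [hcons, harg]
    simp only [pvScan, pvAccum, pvAm]
    by_cases h : v > c + pvCell arr j r
    · rw [if_pos h, if_pos h, ih]
    · rw [if_neg h, if_neg h, ih]

lemma pvFoldlMinLe : ∀ (t : List Int) (v : Int), t.foldl min v ≤ v := by
  intro t
  induction t with
  | nil => simp
  | cons x t ih =>
    intro v
    calc (x :: t).foldl min v = t.foldl min (min v x) := by simp
    _ ≤ min v x := ih _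
    _ ≤ v := min_le_left _ _

lemma pvFoldlMinMem : ∀ (t : List Int) (v : Int), t.foldl min v = v ∨ t.foldl min v ∈ t := by
  intro t
  induction t with
  | nil => intro v; left; rfl
  | cons x t ih =>
    intro v
    have h : (x :: t).foldl min v = t.foldl min (min v x) := by simp
    rcases ih (min v x) with h1 | h1
    · rcases le_total v x with h2 | h2
      · left; rw [h, h1]; exact min_eq_left h2
      · right; rw [h, h1]; simp [min_eq_right h2]
    · right; rw [h]; exact List.mem_cons_of_mem _ h1

lemma pvAm_spec : ∀ (s : List Int) (v b r : Int),
    pvAm v b s r = (s.foldl min v,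
      if s.foldl min v < v
      then r + (((PySem.List.index? s (s.foldl min v)).getD 0 : Nat) : Int)
      else b) := by
  intro s
  induction s with
  | nil => intro v b r; simp [pvAm]
  | cons x t ih =>
    intro v b r
    have hf : (x :: t).foldl min v = t.foldl min (min v x) := by simp
    by_cases h : v > x
    · have hmin : min v x = x := min_eq_right (le_of_lt h)
      have hM : (x :: t).foldl min v = t.foldl min x := by rw [hf, hmin]
      have hMle : t.foldl min x ≤ x := pvFoldlMinLe t x
      simp only [pvAm, if_pos h, ih, hM]
      by_cases h2 : t.foldl min x < x
      · -- min is attained strictly inside t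
        have hne : x ≠ t.foldl min x := by omega
        have hmem : t.foldl min x ∈ t := by
          rcases pvFoldlMinMem t x with h3 | h3
          · omega
          · exact h3
        obtain ⟨p, hp⟩ := Option.isSome_iff_exists.mp ((PySem.List.index?_isSome_iff t _).mpr hmem)
        rw [if_pos h2, if_pos (by omega), PySem.List.index?_cons_of_ne _ hne, hp]
        simp only [Option.map_some, Option.getD_some, Prod.mk.injEq]
        exact ⟨trivial, by push_cast; ring⟩
      · have hx : t.foldl min x = x := le_antisymm hMle (by omega)
        rw [if_neg h2, if_pos (by omega), hx, PySem.List.index?_cons_self]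
        simp
    · have hmin : min v x = v := min_eq_left (by omega)
      have hM : (x :: t).foldl min v = t.foldl min v := by rw [hf, hmin]
      simp only [pvAm, if_neg h, ih, hM]
      by_cases h2 : t.foldl min v < v
      · have hne : x ≠ t.foldl min v := by omega
        have hmem : t.foldl min v ∈ t := by
          rcases pvFoldlMinMem t v with h3 | h3
          · omega
          · exact h3
        obtain ⟨p, hp⟩ := Option.isSome_iff_exists.mp ((PySem.List.index?_isSome_iff t _).mpr hmem)
        rw [if_pos h2, if_pos h2, PySem.List.index?_cons_of_ne _ hne, hp]
        simp only [Option.map_some, Option.getD_some, Prod.mk.injEq]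
        exact ⟨trivial, by push_cast; ring⟩
      · rw [if_neg h2, if_neg h2]

-- ===== VERDICT (by name: the statement is the Claim_ definition above) =====
theorem getReduceRangeVertically_spec : Claim_equal_getReduceRangeVertically := by
  intro arr k i j _ _
  unfold Spec_getReduceRangeVertically getReduceRangeVertically getReduceRangeVertically_alt
  simp only [pvFoldB]
  set stop := min (i + k) ((arr.length : Int) - 1) with hstop
  by_cases hle : stop + 1 ≤ i
  · rw [PySem.List.pyRange_one_eq_nil hle]
    simp [pvAccum]
  · -- nonempty range
    have hlt : i < stop + 1 := by omega
    have hcons := PySem.List.pyRange_one_cons (a := i) (b := stop + 1) hlt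
    rw [hcons]
    simp only [List.foldl_cons, pvAccum, List.nil_append]
    rw [pvFoldA]
    -- rewrite the remaining rows as a normalized range and apply the scan lemma
    set c1 := 0 + pvCell arr j i with hc1
    set l' := PySem.List.pyRange (i + 1) (stop + 1) 1 with hl'
    have hnorm : l' = PySem.List.pyRange (i + 1) ((i + 1) + (((stop + 1) - (i + 1)).toNat : Int)) 1 :=
      pvRangeNorm (i + 1) (stop + 1)
    have hscan : pvScan arr j c1 i c1 l' = pvAm c1 i (pvAccum arr j c1 l') (i + 1) := by
      rw [hnorm]; exact pvScan_pyRange arr j _ (i + 1) c1 i c1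
    rw [hscan, pvAm_spec]
    -- B side: sums = c1 :: pvAccum c1 l'
    have hne : (c1 :: pvAccum arr j c1 l') ≠ [] := by simp
    rw [if_neg hne]
    have hbest : (PySem.List.min? (c1 :: pvAccum arr j c1 l') (fun y => y)).getD 0
        = (pvAccum arr j c1 l').foldl min c1 := by
      rw [PySem.List.min?_id_cons]; rfl
    rw [hbest]
    set M := (pvAccum arr j c1 l').foldl min c1 with hMdef
    have hMle : M ≤ c1 := pvFoldlMinLe _ _
    by_cases h2 : M < c1
    · have hne2 : c1 ≠ M := by omega
      have hmem : M ∈ pvAccum arr j c1 l' := by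
        rcases pvFoldlMinMem (pvAccum arr j c1 l') c1 with h3 | h3
        · omega
        · exact h3
      obtain ⟨p, hp⟩ := Option.isSome_iff_exists.mp ((PySem.List.index?_isSome_iff _ _).mpr hmem)
      rw [if_pos h2, PySem.List.index?_cons_of_ne _ hne2, hp]
      simp only [Option.map_some, Option.getD_some, Prod.mk.injEq]
      refine ⟨trivial, trivial, ?_⟩
      push_cast; ring
    · have hceq : M = c1 := le_antisymm hMle (by omega)
      rw [if_neg h2, hceq, PySem.List.index?_cons_self]
      simp
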